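-- pv_equiv track=rewrite | github.com/premsaisameer/ABDM_Hackathon | abdm/sch.py | make_chunk
-- ===== SOURCE A (Python) =====
-- from math import ceil
--
-- def make_chunk(token):
--     token_size = len(token)
--     number_of_chunk = ceil(token_size/1191)
--     chunk_size = token_size // number_of_chunk
--
--     chunks = []
--     for i in range(number_of_chunk):
--         if i+1 == number_of_chunk:
--             chunks.append(token[chunk_size*i : ])
--         else:
--             chunks.append(token[chunk_size*i : (i+1)*chunk_size])
--
--     return chunks, number_of_chunk
-- ===== SOURCE B (Python) =====
-- from math import ceil
--
-- def make_chunk(token):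
--     # single pass with an accumulator: peel a fixed-size prefix off the
--     # remaining suffix k-1 times; whatever then remains is the last chunk
--     # (so the remainder is absorbed without any index arithmetic).
--     token_size = len(token)
--     number_of_chunk = ceil(token_size / 1191)
--     chunk_size = token_size // number_of_chunk
--     chunks = []
--     rest = token
--     for _ in range(number_of_chunk - 1):
--         chunks.append(rest[:chunk_size])
--         rest = rest[chunk_size:]
--     chunks.append(rest)
--     return chunks, number_of_chunk
-- ===== Notes on version B (the rewrite author's own statement) =====
-- stated objective: alternative
-- what changed: B carries no indices at all: its loop state is (chunks, remaining-suffix) and it peels a fixed-size prefix off the remaining suffix k-1 times, taking the final remainder as the last chunk, instead of A's indexed loop slicing token[cs*i:(i+1)*cs] out of the original string with a last-iteration conditional.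
import Mathlib
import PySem

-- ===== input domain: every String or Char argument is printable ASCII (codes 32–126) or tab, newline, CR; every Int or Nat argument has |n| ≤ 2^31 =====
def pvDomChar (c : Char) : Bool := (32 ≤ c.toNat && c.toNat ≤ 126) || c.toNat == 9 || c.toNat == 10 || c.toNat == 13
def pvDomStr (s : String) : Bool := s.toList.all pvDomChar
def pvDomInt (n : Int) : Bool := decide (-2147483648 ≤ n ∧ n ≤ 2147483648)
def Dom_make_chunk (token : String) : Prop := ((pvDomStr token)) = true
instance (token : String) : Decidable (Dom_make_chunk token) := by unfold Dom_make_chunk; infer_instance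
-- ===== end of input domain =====

-- B replaces A's indexed slicing loop (with a last-iteration conditional) by an
-- accumulator pass over a (chunks, remaining-suffix) state that peels a fixed-size
-- prefix off the remainder k-1 times (alternative decomposition, same cost).


-- ===== PORT A =====
def make_chunk (token : String) : List String × Int :=
  let token_size : Int := PySem.Str.len token
  let number_of_chunk : Int := -(PySem.Int.floordiv (-token_size) 1191)  -- ceil(token_size/1191)
  let chunk_size : Int := PySem.Int.floordiv token_size number_of_chunk
  let chunks : List String :=
    (PySem.List.pyRange 0 number_of_chunk 1).foldl
      (fun chunks i =>
        if i + 1 == number_of_chunk then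
          chunks ++ [PySem.Str.slice token (some (chunk_size * i)) none]
        else
          chunks ++ [PySem.Str.slice token (some (chunk_size * i)) (some ((i + 1) * chunk_size))])
      []
  (chunks, number_of_chunk)

-- ===== PORT B =====
def make_chunk_alt (token : String) : List String × Int :=
  let token_size : Int := PySem.Str.len token
  let number_of_chunk : Int := -(PySem.Int.floordiv (-token_size) 1191)  -- ceil(token_size/1191)
  let chunk_size : Int := PySem.Int.floordiv token_size number_of_chunk
  let st : List String × String :=
    (PySem.List.pyRange 0 (number_of_chunk - 1) 1).foldl
      (fun (st : List String × String) _ =>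
        (st.1 ++ [PySem.Str.slice st.2 none (some chunk_size)],
         PySem.Str.slice st.2 (some chunk_size) none))
      ([], token)
  (st.1 ++ [st.2], number_of_chunk)

-- ===== PRECONDITION & SPEC =====
-- Pre_ excludes only the empty token, on which both A and B raise ZeroDivisionError (0 // 0).
def Pre_make_chunk (token : String) : Prop := token ≠ ""
instance (token : String) : Decidable (Pre_make_chunk token) := by unfold Pre_make_chunk; infer_instance
def pvWitness_make_chunk : String := "abc"

def Spec_make_chunk (token : String) (out : List String × Int) : Prop := out = make_chunk_alt token
instance (token : String) (out : List String × Int) : Decidable (Spec_make_chunk token out) := by unfold Spec_make_chunk; infer_instance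

-- ===== CLAIM =====
def Claim_equal_make_chunk : Prop := ∀ (token : String), Dom_make_chunk token → Pre_make_chunk token → Spec_make_chunk token (make_chunk token)

-- ===== LEMMAS AND PROOFS =====

-- loop invariant of B's peel pass: after m iterations the accumulated chunks are the
-- first m fixed-size blocks and the carried suffix is everything from position c*m on
lemma pv_peel_inv (token : String) (cs : Int) (c : Nat) (hc : cs = (c : Int)) (m : Nat) :
    (PySem.List.pyRange 0 (m : Int) 1).foldl
      (fun (st : List String × String) _ =>
        (st.1 ++ [PySem.Str.slice st.2 none (some cs)],
         PySem.Str.slice st.2 (some cs) none))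
      ([], token)
    = ((List.range m).map
         (fun j => String.ofList ((token.toList.drop (c * j)).take c)),
       String.ofList (token.toList.drop (c * m))) := by
  induction m with
  | zero => simp [PySem.List.pyRange_one_eq_nil]
  | succ m ih =>
    rw [show ((m + 1 : Nat) : Int) = (m : Int) + 1 by push_cast; ring,
        PySem.List.pyRange_one_succ_right (by positivity), List.foldl_append, ih]
    simp only [List.foldl_cons, List.foldl_nil]
    refine Prod.ext ?_ ?_
    · rw [List.range_succ, List.map_append]
      simp only [List.map_cons, List.map_nil]
      congr 1
      congr 1
      apply String.toList_inj.mp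
      rw [PySem.Str.toList_slice, PySem.Chars.slice_eq_listSlice]
      simp only [String.toList_ofList]
      rw [hc, PySem.List.slice_to_natCast]
    · apply String.toList_inj.mp
      rw [PySem.Str.toList_slice, PySem.Chars.slice_eq_listSlice]
      simp only [String.toList_ofList]
      rw [hc, PySem.List.slice_from_natCast, List.drop_drop]
      congr 1

-- ===== VERDICT =====
theorem make_chunk_spec : Claim_equal_make_chunk := by
  intro token _ hpre
  unfold Spec_make_chunk make_chunk make_chunk_alt
  simp only []
  set n : Int := PySem.Str.len token with hn
  set k : Int := -(PySem.Int.floordiv (-n) 1191) with hk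
  set cs : Int := PySem.Int.floordiv n k with hcs
  have hn0 : 0 < n := by
    rw [hn, PySem.Str.len_eq]
    have : token.toList ≠ [] := by
      intro h
      exact hpre (String.toList_inj.mp (by simp [h]))
    have := List.length_pos_iff.mpr this
    exact_mod_cast this
  have hkk : (k - 1) * 1191 < n ∧ n ≤ k * 1191 :=
    (PySem.Int.neg_floordiv_neg_eq_iff_of_pos (a := n) (b := 1191) (q := k) (by norm_num)).mp hk.symm
  have hk0 : 0 < k := by nlinarith [hkk.1, hkk.2]
  have hcs0 : 0 ≤ cs := by
    rw [hcs, PySem.Int.floordiv_eq_ediv_of_pos hk0]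
    exact Int.ediv_nonneg (le_of_lt hn0) (le_of_lt hk0)
  obtain ⟨c, hc⟩ : ∃ c : Nat, cs = (c : Int) := ⟨cs.toNat, (Int.toNat_of_nonneg hcs0).symm⟩
  obtain ⟨m, hm⟩ : ∃ m : Nat, k - 1 = (m : Int) :=
    ⟨(k - 1).toNat, (Int.toNat_of_nonneg (by omega)).symm⟩
  refine Prod.ext ?_ rfl
  -- turn A's conditional-append fold into a map
  have hfold :
      (PySem.List.pyRange 0 k 1).foldl
        (fun chunks i =>
          if i + 1 == k then
            chunks ++ [PySem.Str.slice token (some (cs * i)) none]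
          else
            chunks ++ [PySem.Str.slice token (some (cs * i)) (some ((i + 1) * cs))]) [] =
      (PySem.List.pyRange 0 k 1).map
        (fun i => if i + 1 == k then PySem.Str.slice token (some (cs * i)) none
                  else PySem.Str.slice token (some (cs * i)) (some ((i + 1) * cs))) := by
    have hbody : (fun (chunks : List String) (i : Int) =>
          if i + 1 == k then
            chunks ++ [PySem.Str.slice token (some (cs * i)) none]
          else
            chunks ++ [PySem.Str.slice token (some (cs * i)) (some ((i + 1) * cs))]) =
        (fun chunks i => chunks ++
          [if i + 1 == k then PySem.Str.slice token (some (cs * i)) none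
           else PySem.Str.slice token (some (cs * i)) (some ((i + 1) * cs))]) := by
      funext chunks i
      exact (apply_ite (chunks ++ [·]) _ _ _).symm
    rw [hbody, PySem.List.foldl_append_singleton_eq_map]
    simp
  simp only [hfold]
  -- evaluate B's peel loop with the invariant
  rw [show k - 1 = (m : Int) from hm, pv_peel_inv token cs c hc m]
  -- split A's range at its last index
  have hkm1 : k = (m : Int) + 1 := by omega
  rw [hkm1, PySem.List.pyRange_one_succ_right (by positivity), List.map_append]
  congr 1
  · -- the first m chunks agree
    rw [PySem.List.pyRange_one]
    simp only [zero_add, List.map_map]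
    apply List.map_eq_map_iff.mpr
    intro j hj
    have hjm : j < m := List.mem_range.mp hj
    simp only [Function.comp]
    rw [if_neg (by simp; omega)]
    apply String.toList_inj.mp
    rw [PySem.Str.toList_slice, PySem.Chars.slice_eq_listSlice]
    simp only [String.toList_ofList]
    rw [hc, show (c : Int) * (j : Int) = ((c * j : Nat) : Int) by push_cast; ring,
        show ((j : Int) + 1) * (c : Int) = ((c * j + c : Nat) : Int) by push_cast; ring,
        PySem.List.slice_natCast]
    congr 1
    omega
  · -- the last chunk agrees
    simp only [List.map_cons, List.map_nil]
    rw [if_pos (by simp)]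
    congr 1
    apply String.toList_inj.mp
    rw [PySem.Str.toList_slice, PySem.Chars.slice_eq_listSlice]
    simp only [String.toList_ofList]
    rw [hc, show (c : Int) * (m : Int) = ((c * m : Nat) : Int) by push_cast; ring,
        PySem.List.slice_from_natCast]
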